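-- pv_equiv track=rewrite | github.com/RyeMcKenzie81/ryan-viral-pattern-detector | viraltracker/services/ad_analysis_service.py | _rank_by_frequency
-- ===== SOURCE A (Python) =====
-- from typing import List, Dict, Any, Optional, Callable, Set
-- from collections import Counter
--
-- def _rank_by_frequency(
--
--     items: List[str],
--     max_items: int = 10,
--     min_count: int = 1
-- ) -> List[str]:
--     """
--     Rank items by frequency, deduplicate similar items.
--
--     Args:
--         items: List of strings to rank
--         max_items: Maximum items to return
--         min_count: Minimum occurrences to include
--
--     Returns:
--         List of unique items sorted by frequency
--     """
--     if not items:
--         return []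
--
--     # Normalize items (lowercase, strip)
--     normalized = [s.strip().lower() for s in items if s and s.strip()]
--
--     # Count frequencies
--     counter = Counter(normalized)
--
--     # Filter by min_count and get top items
--     ranked = [
--         item for item, count in counter.most_common(max_items * 2)
--         if count >= min_count
--     ]
--
--     # Return with original casing (find first occurrence)
--     original_case = {}
--     for item in items:
--         if item and item.strip():
--             key = item.strip().lower()
--             if key not in original_case:
--                 original_case[key] = item.strip()
--
--     result = [original_case.get(r, r) for r in ranked[:max_items]]
--     return result
-- ===== SOURCE B (Python) =====
-- from typing import List
--
-- def _rank_by_frequency(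
--     items: List[str],
--     max_items: int = 10,
--     min_count: int = 1
-- ) -> List[str]:
--     # Bucket (pigeonhole) ranking: no comparison sort at all.
--     # Pass 1: key -> [first stripped casing, count] in first-occurrence order.
--     entries = {}
--     for s in items:
--         if s and s.strip():
--             t = s.strip()
--             k = t.lower()
--             if k in entries:
--                 entries[k][1] += 1
--             else:
--                 entries[k] = [t, 1]
--     # Pass 2: distribute entries into count buckets (counting sort by frequency).
--     buckets = {}
--     maxc = 0
--     for cased, cnt in entries.values():
--         buckets.setdefault(cnt, []).append(cased)
--         if cnt > maxc:
--             maxc = cnt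
--     # Walk counts from the highest down to max(min_count, 1), collecting up to max_items.
--     out = []
--     c = maxc
--     while c >= min_count and c >= 1 and len(out) < max_items:
--         for cased in buckets.get(c, []):
--             if len(out) >= max_items:
--                 break
--             out.append(cased)
--         c -= 1
--     return out
-- ===== Notes on version B (the rewrite author's own statement) =====
-- stated objective: alternative
-- what changed: Replaces Counter + most_common (a comparison sort) + a second original-casing pass with one entries pass followed by a counting sort: entries are distributed into count buckets and the result is collected by walking the counts from the highest bucket down, so no comparison sort is performed at all.
import Mathlib
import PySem

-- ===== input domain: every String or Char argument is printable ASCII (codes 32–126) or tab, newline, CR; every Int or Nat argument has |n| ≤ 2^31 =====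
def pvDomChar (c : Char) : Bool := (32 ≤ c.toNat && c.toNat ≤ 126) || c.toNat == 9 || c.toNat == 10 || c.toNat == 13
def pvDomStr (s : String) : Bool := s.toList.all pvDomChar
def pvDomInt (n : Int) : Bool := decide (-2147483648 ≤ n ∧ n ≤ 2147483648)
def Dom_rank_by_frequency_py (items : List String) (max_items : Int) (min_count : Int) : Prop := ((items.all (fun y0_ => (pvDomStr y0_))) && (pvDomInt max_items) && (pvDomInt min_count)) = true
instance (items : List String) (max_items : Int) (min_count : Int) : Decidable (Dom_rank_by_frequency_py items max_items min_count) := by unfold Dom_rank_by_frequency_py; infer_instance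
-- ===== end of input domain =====

-- B replaces Counter + most_common (a comparison sort) + a second original-casing pass by one
-- entries pass and a counting sort: entries are distributed into count buckets and collected by
-- walking the counts from the highest down — no comparison sort at all ('alternative' objective).

-- `s and s.strip()` (string truthiness) and `s.strip().lower()`, shared by both Pythons
def pvKeep (s : String) : Bool := !(s == "") && !(PySem.Str.strip s == "")
def pvNorm (s : String) : String := PySem.Str.lower (PySem.Str.strip s)

-- ===== PORT A =====
-- exact port of Counter.most_common(n): stable sort by count descending truncated to n
-- (heapq.nlargest, documented as sorted(..., reverse=True)[:n]; returns [] for n ≤ 0)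
def pyMostCommon (d : PySem.Dict String Int) (n : Int) : List (String × Int) :=
  if n ≤ 0 then [] else PySem.List.slice (PySem.List.sorted d.items (fun p => p.2) true) none (some n)

def rank_by_frequency_py (items : List String) (max_items : Int) (min_count : Int) : List String :=
  if items = [] then []
  else
    let normalized := (items.filter pvKeep).map pvNorm
    let counter := PySem.Dict.counter normalized
    let ranked := ((pyMostCommon counter (max_items * 2)).filter
        (fun p => min_count ≤ p.2)).map (fun p => p.1)
    let original_case := items.foldl (fun d s =>
        if pvKeep s then
          (if d.contains (pvNorm s) then d else d.insert (pvNorm s) (PySem.Str.strip s))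
        else d) PySem.Dict.empty
    (PySem.List.slice ranked none (some max_items)).map (fun r => original_case.getD r r)

-- ===== PORT B =====
-- inner `for cased in buckets.get(c, []): if len(out) >= max_items: break; out.append(cased)`
def pvInner (m : Int) : List String → List String → List String
  | out, [] => out
  | out, x :: xs => if m ≤ (out.length : Int) then out else pvInner m (out ++ [x]) xs

-- outer `while c >= min_count and c >= 1 and len(out) < max_items: …; c -= 1`
def pvOuter (bk : PySem.Dict Int (List String)) (mc m : Int) (c : Int) (out : List String) :
    List String :=
  if h : mc ≤ c ∧ 1 ≤ c ∧ (out.length : Int) < m then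
    pvOuter bk mc m (c - 1) (pvInner m out (bk.getD c []))
  else out
termination_by c.toNat
decreasing_by omega

def rank_by_frequency_py_alt (items : List String) (max_items : Int) (min_count : Int) :
    List String :=
  let entries := items.foldl (fun d s =>
      if pvKeep s then
        (if d.contains (pvNorm s) then d.modify (pvNorm s) ("", 0) (fun e => (e.1, e.2 + 1))
         else d.insert (pvNorm s) (PySem.Str.strip s, 1))
      else d) (PySem.Dict.empty : PySem.Dict String (String × Int))
  -- buckets.setdefault(cnt, []).append(cased) mutates the bucket in place = modify cnt [] (· ++ [cased])
  let st := entries.values.foldl (fun st e =>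
      (st.1.modify e.2 [] (fun b => b ++ [e.1]), if st.2 < e.2 then e.2 else st.2))
      ((PySem.Dict.empty : PySem.Dict Int (List String)), (0 : Int))
  pvOuter st.1 min_count max_items st.2 []

-- ===== PRECONDITION & SPEC =====
def Spec_rank_by_frequency_py (items : List String) (max_items : Int) (min_count : Int) (out : List String) : Prop := out = rank_by_frequency_py_alt items max_items min_count
instance (items : List String) (max_items : Int) (min_count : Int) (out : List String) : Decidable (Spec_rank_by_frequency_py items max_items min_count out) := by unfold Spec_rank_by_frequency_py; infer_instance

-- ===== CLAIM (what is proved, stated in full; the proofs are below) =====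
def Claim_equal_rank_by_frequency_py : Prop := ∀ (items : List String) (max_items : Int) (min_count : Int), Dom_rank_by_frequency_py items max_items min_count → Spec_rank_by_frequency_py items max_items min_count (rank_by_frequency_py items max_items min_count)

-- ===== LEMMAS AND PROOFS =====

-- the three loop bodies (A's counter as a fold over items, A's casing pass, B's entries pass)
def pvStepC (d : PySem.Dict String Int) (s : String) : PySem.Dict String Int :=
  if pvKeep s then d.modify (pvNorm s) 0 (· + 1) else d
def pvStepA (d : PySem.Dict String String) (s : String) : PySem.Dict String String :=
  if pvKeep s then (if d.contains (pvNorm s) then d else d.insert (pvNorm s) (PySem.Str.strip s)) else d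
def pvStepB (d : PySem.Dict String (String × Int)) (s : String) : PySem.Dict String (String × Int) :=
  if pvKeep s then
    (if d.contains (pvNorm s) then d.modify (pvNorm s) ("", 0) (fun e => (e.1, e.2 + 1))
     else d.insert (pvNorm s) (PySem.Str.strip s, 1))
  else d

-- coupling invariant between the three folds
def pvInv (cD : PySem.Dict String Int) (aD : PySem.Dict String String)
    (bD : PySem.Dict String (String × Int)) : Prop :=
  bD.items = cD.items.map (fun p => (p.1, ((aD.get? p.1).getD "", p.2))) ∧
  ∀ k, aD.contains k = cD.contains k

theorem pv_mem_contains {ν : Type} (d : PySem.Dict String ν) (p : String × ν)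
    (hp : p ∈ d.items) : d.contains p.1 = true := by
  simp only [PySem.Dict.contains, List.any_eq_true]
  exact ⟨p, hp, by simp⟩

theorem pvInv_step (cD : PySem.Dict String Int) (aD : PySem.Dict String String)
    (bD : PySem.Dict String (String × Int)) (s : String) (h : pvInv cD aD bD) :
    pvInv (pvStepC cD s) (pvStepA aD s) (pvStepB bD s) := by
  obtain ⟨h1, h2⟩ := h
  unfold pvStepC pvStepA pvStepB
  by_cases hk : pvKeep s = true
  · simp only [hk, if_true]
    have hbc : bD.contains (pvNorm s) = cD.contains (pvNorm s) := by
      simp only [PySem.Dict.contains, h1, List.any_map]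
      rfl
    by_cases hc : cD.contains (pvNorm s) = true
    · -- key already present: in-place count bump on both sides, casing dict untouched
      have ha : aD.contains (pvNorm s) = true := by rw [h2]; exact hc
      rw [hbc]
      simp only [hc, ha, if_true]
      -- the existing entry of cD at the key
      have hfind : (cD.items.find? (fun p => p.1 == pvNorm s)).isSome := by
        rw [List.find?_isSome]
        simp only [PySem.Dict.contains, List.any_eq_true] at hc
        exact hc
      obtain ⟨q, hq⟩ := Option.isSome_iff_exists.mp hfind
      have hq1 : q.1 = pvNorm s := by
        have := List.find?_some hq
        simpa using this
      have hgetc : cD.get? (pvNorm s) = some q.2 := by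
        simp only [PySem.Dict.get?, hq, Option.map_some]
      have hfindb : bD.items.find? (fun p => p.1 == pvNorm s)
          = some (q.1, ((aD.get? q.1).getD "", q.2)) := by
        rw [h1, List.find?_map]
        have hcomp : ((fun p : String × (String × Int) => p.1 == pvNorm s) ∘
            (fun p : String × Int => (p.1, ((aD.get? p.1).getD "", p.2))))
            = (fun p : String × Int => p.1 == pvNorm s) := rfl
        rw [hcomp, hq]
        rfl
      have hgetb : bD.get? (pvNorm s) = some ((aD.get? (pvNorm s)).getD "", q.2) := by
        show Option.map (fun x => x.2) (bD.items.find? (fun p => p.1 == pvNorm s)) = _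
        rw [hfindb, hq1]
        rfl
      constructor
      · -- items relation is preserved
        simp only [PySem.Dict.modify]
        rw [PySem.Dict.items_insert_of_contains _ _ hc,
            PySem.Dict.items_insert_of_contains _ _ (hbc.trans hc)]
        rw [h1, List.map_map, List.map_map]
        apply List.map_congr_left
        intro p _
        simp only [Function.comp_apply, PySem.Dict.getD_eq_get?_getD, hgetb, hgetc]
        by_cases hpk : p.1 = pvNorm s
        · simp [hpk]
        · simp [hpk]
      · -- aD unchanged, cD keys unchanged
        intro j
        simp only [PySem.Dict.modify]
        rw [PySem.Dict.contains_insert]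
        by_cases hj : j = pvNorm s
        · subst hj; simp [ha, hc]
        · simp [hj, h2 j]
    · -- fresh key: all three dicts append
      have ha : aD.contains (pvNorm s) = false := by rw [h2]; simpa using hc
      have hb : bD.contains (pvNorm s) = false := by rw [hbc]; simpa using hc
      rw [hbc]
      simp only [hc, ha, Bool.false_eq_true, if_false]
      have hgc : cD.getD (pvNorm s) 0 = 0 := PySem.Dict.getD_of_not_contains _ _ (by simpa using hc)
      constructor
      · simp only [PySem.Dict.modify]
        rw [PySem.Dict.items_insert_of_not_contains _ _ hb,
            PySem.Dict.items_insert_of_not_contains _ _ (by simpa using hc)]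
        rw [hgc, List.map_append]
        congr 1
        · rw [h1]
          apply List.map_congr_left
          intro p hp
          have hpk : p.1 ≠ pvNorm s := by
            intro hpe
            have := pv_mem_contains cD p hp
            rw [hpe] at this
            simp [this] at hc
          rw [PySem.Dict.get?_insert_of_ne _ _ hpk]
        · simp [PySem.Dict.get?_insert_self]
      · intro j
        simp only [PySem.Dict.modify]
        rw [PySem.Dict.contains_insert, PySem.Dict.contains_insert]
        rw [h2 j]
  · simp only [hk, Bool.false_eq_true, if_false]
    exact ⟨h1, h2⟩

theorem pvInv_fold (l : List String) (cD : PySem.Dict String Int) (aD : PySem.Dict String String)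
    (bD : PySem.Dict String (String × Int)) (h : pvInv cD aD bD) :
    pvInv (l.foldl pvStepC cD) (l.foldl pvStepA aD) (l.foldl pvStepB bD) := by
  induction l generalizing cD aD bD with
  | nil => exact h
  | cons s t ih => exact ih _ _ _ (pvInv_step _ _ _ _ h)

-- insertion sort commutes with a key-preserving map
theorem pv_insertBy_map {α β : Type} (f : α → β) (ba : α → α → Bool) (bb : β → β → Bool)
    (hb : ∀ a c, bb (f a) (f c) = ba a c) (x : α) (acc : List α) :
    PySem.List.insertBy bb (f x) (acc.map f) = (PySem.List.insertBy ba x acc).map f := by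
  induction acc with
  | nil => simp [PySem.List.insertBy]
  | cons y ys ih =>
    simp only [List.map_cons, PySem.List.insertBy, hb]
    by_cases hxy : ba x y = true
    · simp [hxy]
    · simp only [hxy, Bool.false_eq_true, if_false, List.map_cons]
      rw [ih]

theorem pv_sorted_rev_map {α β : Type} (l : List α) (f : α → β)
    (ka : α → Int) (kb : β → Int) (h : ∀ a, kb (f a) = ka a) :
    PySem.List.sorted (l.map f) kb true = (PySem.List.sorted l ka true).map f := by
  rw [PySem.List.sorted_rev_eq_foldl_insertBy, PySem.List.sorted_rev_eq_foldl_insertBy]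
  have key : ∀ (t : List α) (acc : List α),
      (t.map f).foldl (fun acc x => PySem.List.insertBy (fun a b => decide (kb b < kb a)) x acc)
        (acc.map f)
      = (t.foldl (fun acc x => PySem.List.insertBy (fun a b => decide (ka b < ka a)) x acc)
          acc).map f := by
    intro t
    induction t with
    | nil => intro acc; rfl
    | cons x r ih =>
      intro acc
      simp only [List.map_cons, List.foldl_cons]
      rw [pv_insertBy_map f (fun a b => decide (ka b < ka a)) (fun a b => decide (kb b < kb a))
        (by intro a c; simp [h]) x acc]
      exact ih _
  simpa using key l []

-- on a count-descending list, filtering by a count threshold is a takeWhile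
theorem pv_filter_eq_takeWhile (S : List (String × Int)) (mc : Int)
    (hS : S.Pairwise (fun a b => b.2 ≤ a.2)) :
    S.filter (fun p => decide (mc ≤ p.2)) = S.takeWhile (fun p => decide (mc ≤ p.2)) := by
  induction S with
  | nil => rfl
  | cons p T ih =>
    rcases List.pairwise_cons.mp hS with ⟨hp, hT⟩
    by_cases hmc : mc ≤ p.2
    · simp [hmc, ih hT]
    · simp only [List.filter_cons, List.takeWhile_cons, hmc, decide_false, Bool.false_eq_true,
        if_false]
      rw [List.filter_eq_nil_iff.mpr]
      intro q hq
      have := hp q hq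
      simp
      omega

theorem pv_takeWhile_take {α : Type} (p : α → Bool) (l : List α) (n : Nat) :
    (l.take n).takeWhile p = (l.takeWhile p).take n := by
  induction l generalizing n with
  | nil => simp
  | cons a l ih =>
    cases n with
    | zero => simp
    | succ n =>
      simp only [List.take_succ_cons, List.takeWhile_cons]
      by_cases hpa : p a = true
      · simp [hpa, ih]
      · simp [hpa]

-- a takeWhile whose every element fails is empty
theorem pv_takeWhile_none {α : Type} (p : α → Bool) (l : List α)
    (h : ∀ y ∈ l, p y = false) : l.takeWhile p = [] := by
  cases l with
  | nil => rfl
  | cons a l => simp [h a (by simp)]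

-- ===== counting-sort machinery for B =====

-- buckets maxc, maxc-1, …, 1 laid out left to right
def pvGather (L : List (String × Int)) : Nat → List (String × Int)
  | 0 => []
  | d + 1 => L.filter (fun p => p.2 == ((d : Int) + 1)) ++ pvGather L d

theorem pv_gather_nil (n : Nat) : pvGather [] n = [] := by
  induction n with
  | zero => rfl
  | succ d ih => simp [pvGather, ih]

theorem pv_gather_bounds (L : List (String × Int)) (n : Nat) :
    ∀ p ∈ pvGather L n, 1 ≤ p.2 ∧ p.2 ≤ (n : Int) := by
  induction n with
  | zero => simp [pvGather]
  | succ d ih =>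
    intro p hp
    rcases List.mem_append.mp hp with h | h
    · have := (List.mem_filter.mp h).2
      have he : p.2 = (d : Int) + 1 := by simpa using this
      constructor <;> [omega; skip]
      rw [he]; push_cast; omega
    · have := ih p h
      constructor
      · exact this.1
      · have h2 := this.2
        push_cast
        omega

theorem pv_gather_append_gt (L : List (String × Int)) (x : String × Int) (n : Nat)
    (h : (n : Int) < x.2) : pvGather (L ++ [x]) n = pvGather L n := by
  induction n with
  | zero => rfl
  | succ d ih =>
    have hne : ¬ (x.2 == ((d : Int) + 1)) = true := by
      simp only [beq_iff_eq]
      push_cast at h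
      omega
    simp only [pvGather, List.filter_append, List.filter_cons, hne, Bool.false_eq_true, if_false,
      List.filter_nil, List.append_nil]
    rw [ih (by push_cast at h ⊢; omega)]

theorem pv_insertBy_skip {α : Type} (cmp : α → α → Bool) (x : α) (P Q : List α)
    (h : ∀ y ∈ P, cmp x y = false) :
    PySem.List.insertBy cmp x (P ++ Q) = P ++ PySem.List.insertBy cmp x Q := by
  induction P with
  | nil => rfl
  | cons y P ih =>
    simp only [List.cons_append, PySem.List.insertBy, h y (by simp), Bool.false_eq_true, if_false]
    rw [ih (fun z hz => h z (by simp [hz]))]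

theorem pv_insertBy_front {α : Type} (cmp : α → α → Bool) (x : α) (Q : List α)
    (h : ∀ y ∈ Q, cmp x y = true) : PySem.List.insertBy cmp x Q = x :: Q := by
  cases Q with
  | nil => rfl
  | cons y Q => simp [PySem.List.insertBy, h y (by simp)]

-- inserting a new element into the bucket layout lands at the end of its own bucket
theorem pv_insert_gather (L : List (String × Int)) (x : String × Int) (n : Nat)
    (h1 : 1 ≤ x.2) (h2 : x.2 ≤ (n : Int)) :
    PySem.List.insertBy (fun a b : String × Int => decide (b.2 < a.2)) x (pvGather L n)
      = pvGather (L ++ [x]) n := by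
  induction n with
  | zero => simp at h2; omega
  | succ d ih =>
    by_cases hx : x.2 = (d : Int) + 1
    · have hskip : ∀ y ∈ L.filter (fun p => p.2 == ((d : Int) + 1)),
          (decide (y.2 < x.2)) = false := by
        intro y hy
        have := (List.mem_filter.mp hy).2
        have he : y.2 = (d : Int) + 1 := by simpa using this
        simp [he, hx]
      have hfront : ∀ y ∈ pvGather L d, (decide (y.2 < x.2)) = true := by
        intro y hy
        have := (pv_gather_bounds L d y hy).2
        simp [hx]
        omega
      simp only [pvGather]
      rw [pv_insertBy_skip _ _ _ _ hskip, pv_insertBy_front _ _ _ hfront]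
      rw [pv_gather_append_gt L x d (by rw [hx]; omega)]
      simp only [List.filter_append, List.filter_cons, List.filter_nil]
      rw [show (x.2 == ((d : Int) + 1)) = true by simpa using hx]
      simp
    · have hxd : x.2 ≤ (d : Int) := by push_cast at h2; omega
      have hskip : ∀ y ∈ L.filter (fun p => p.2 == ((d : Int) + 1)),
          (decide (y.2 < x.2)) = false := by
        intro y hy
        have := (List.mem_filter.mp hy).2
        have he : y.2 = (d : Int) + 1 := by simpa using this
        simp [he]
        omega
      simp only [pvGather]
      rw [pv_insertBy_skip _ _ _ _ hskip, ih hxd]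
      simp only [List.filter_append, List.filter_cons, List.filter_nil]
      rw [show (x.2 == ((d : Int) + 1)) = false by simpa using hx]
      simp

-- the bucket layout IS the stable descending sort by count
theorem pv_gather_sorted (L : List (String × Int)) (n : Nat)
    (h : ∀ p ∈ L, 1 ≤ p.2 ∧ p.2 ≤ (n : Int)) :
    PySem.List.sorted L (fun p => p.2) true = pvGather L n := by
  induction L using List.reverseRecOn with
  | nil => simp [pv_gather_nil, PySem.List.sorted_rev_eq_foldl_insertBy]
  | append_singleton T x ih =>
    rw [PySem.List.sorted_rev_eq_foldl_insertBy, List.foldl_append, List.foldl_cons,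
      List.foldl_nil, ← PySem.List.sorted_rev_eq_foldl_insertBy]
    rw [ih (fun p hp => h p (by simp [hp]))]
    exact pv_insert_gather T x n (h x (by simp)).1 (h x (by simp)).2

-- B's inner for-loop appends a prefix of the bucket, up to the remaining capacity
theorem pv_inner_spec (m : Int) (xs out : List String) :
    pvInner m out xs = out ++ xs.take (m.toNat - out.length) := by
  induction xs generalizing out with
  | nil => simp [pvInner]
  | cons x xs ih =>
    simp only [pvInner]
    by_cases hfull : m ≤ (out.length : Int)
    · rw [if_pos hfull]
      have : m.toNat - out.length = 0 := by omega
      simp [this]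
    · rw [if_neg hfull, ih]
      have hk : m.toNat - out.length = (m.toNat - (out ++ [x]).length) + 1 := by
        simp; omega
      rw [hk]
      simp [List.take_succ_cons]

-- B's while-loop collects, from the bucket layout, the ≥ min_count prefix up to max_items
theorem pv_outer_spec (bk : PySem.Dict Int (List String)) (L : List (String × Int)) (mc m : Int)
    (hbk : ∀ c : Int, bk.getD c [] = (L.filter (fun p => p.2 == c)).map (fun p => p.1)) :
    ∀ (n : Nat) (c : Int), c.toNat = n → ∀ out : List String,
      pvOuter bk mc m c out
        = out ++ (((pvGather L n).takeWhile (fun p => decide (mc ≤ p.2))).take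
            (m.toNat - out.length)).map (fun p => p.1) := by
  intro n
  induction n with
  | zero =>
    intro c hc out
    rw [pvOuter, dif_neg (by omega)]
    simp [pvGather]
  | succ d ih =>
    intro c hc out
    have hcd : c = (d : Int) + 1 := by omega
    rw [pvOuter]
    by_cases h : mc ≤ c ∧ 1 ≤ c ∧ (out.length : Int) < m
    · rw [dif_pos h]
      rw [hbk c, pv_inner_spec]
      rw [ih (c - 1) (by omega)]
      set P := L.filter (fun p => p.2 == c) with hP
      have hPg : L.filter (fun p => p.2 == ((d : Int) + 1)) = P := by rw [hP, hcd]
      have hpass : (pvGather L (d + 1)).takeWhile (fun p => decide (mc ≤ p.2))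
          = P ++ (pvGather L d).takeWhile (fun p => decide (mc ≤ p.2)) := by
        simp only [pvGather, hPg]
        apply List.takeWhile_append_of_pos
        intro y hy
        have := (List.mem_filter.mp hy).2
        have he : y.2 = c := by rw [hP] at hy; simpa using (List.mem_filter.mp hy).2
        simp [he]
        omega
      rw [hpass, List.take_append, List.map_append]
      rw [← List.map_take]
      rw [← List.append_assoc]
      congr 2
      congr 1
      simp only [List.length_append, List.length_map, List.length_take]
      omega
    · rw [dif_neg h]
      by_cases hmc : mc ≤ c
      · -- out is full: no capacity left
        have hm : m ≤ (out.length : Int) := by omega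
        have : m.toNat - out.length = 0 := by omega
        simp [this]
      · -- every remaining bucket is below min_count
        rw [pv_takeWhile_none _ _ (fun y hy => by
          have := (pv_gather_bounds L (d + 1) y hy).2
          simp only [decide_eq_false_iff_not, not_le]
          push_cast at this
          omega)]
        simp

-- the running maximum fold bounds every count
theorem pv_foldl_max_bounds (l : List (String × Int)) (a : Int) :
    a ≤ l.foldl (fun mx e => if mx < e.2 then e.2 else mx) a ∧
    ∀ p ∈ l, p.2 ≤ l.foldl (fun mx e => if mx < e.2 then e.2 else mx) a := by
  induction l generalizing a with
  | nil => simp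
  | cons x t ih =>
    simp only [List.foldl_cons]
    set a' := if a < x.2 then x.2 else a with ha'
    have h1 : a ≤ a' := by rw [ha']; split <;> omega
    have h2 : x.2 ≤ a' := by rw [ha']; split <;> omega
    obtain ⟨ih1, ih2⟩ := ih a'
    refine ⟨le_trans h1 ih1, ?_⟩
    intro p hp
    rcases List.mem_cons.mp hp with h | h
    · rw [h]; exact le_trans h2 ih1
    · exact ih2 p h

-- the whole equivalence, unconditionally
theorem pv_main (items : List String) (m mc : Int) :
    rank_by_frequency_py items m mc = rank_by_frequency_py_alt items m mc := by
  by_cases hnil : items = []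
  · subst hnil
    rw [show rank_by_frequency_py [] m mc = [] by simp [rank_by_frequency_py]]
    simp only [rank_by_frequency_py_alt, List.foldl_nil]
    rw [show (PySem.Dict.empty : PySem.Dict String (String × Int)).values = [] from rfl]
    rw [List.foldl_nil, pvOuter, dif_neg (by omega)]
  · simp only [rank_by_frequency_py, rank_by_frequency_py_alt]
    rw [if_neg hnil]
    have hC : PySem.Dict.counter ((items.filter pvKeep).map pvNorm)
        = items.foldl pvStepC PySem.Dict.empty := by
      rw [PySem.Dict.counter_eq_foldl, List.foldl_map, List.foldl_filter]
      rfl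
    have hB : (items.foldl (fun d s =>
        if pvKeep s then
          (if d.contains (pvNorm s) then d.modify (pvNorm s) ("", 0) (fun e => (e.1, e.2 + 1))
           else d.insert (pvNorm s) (PySem.Str.strip s, 1))
        else d) (PySem.Dict.empty : PySem.Dict String (String × Int)))
        = items.foldl pvStepB PySem.Dict.empty := rfl
    have hA : (items.foldl (fun d s =>
        if pvKeep s then
          (if d.contains (pvNorm s) then d else d.insert (pvNorm s) (PySem.Str.strip s))
        else d) (PySem.Dict.empty : PySem.Dict String String))
        = items.foldl pvStepA PySem.Dict.empty := rfl
    have hCpos : ∀ p ∈ (items.foldl pvStepC (PySem.Dict.empty : PySem.Dict String Int)).items,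
        1 ≤ p.2 := by
      rw [← hC]
      intro p hp
      rw [PySem.Dict.items_counter] at hp
      obtain ⟨k, hk, hpe⟩ := List.mem_map.mp hp
      have hkm : k ∈ (items.filter pvKeep).map pvNorm := (PySem.Set.mem_ofList _ _).mp hk
      have : 0 < ((items.filter pvKeep).map pvNorm).count k := List.count_pos_iff.mpr hkm
      rw [← hpe]
      simp only
      omega
    rw [hC, hB, hA]
    obtain ⟨h1, h2⟩ := pvInv_fold items PySem.Dict.empty PySem.Dict.empty PySem.Dict.empty
      ⟨rfl, fun _ => rfl⟩
    set C := items.foldl pvStepC PySem.Dict.empty with hCdef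
    set O := items.foldl pvStepA PySem.Dict.empty with hOdef
    set E := items.foldl pvStepB PySem.Dict.empty with hEdef
    -- split B's bucket/maximum pair fold
    rw [show (E.values.foldl (fun st e =>
        (st.1.modify e.2 [] (fun b => b ++ [e.1]), if st.2 < e.2 then e.2 else st.2))
        ((PySem.Dict.empty : PySem.Dict Int (List String)), (0 : Int)))
        = (E.values.foldl (fun d e => d.modify e.2 [] (fun b => b ++ [e.1])) PySem.Dict.empty,
           E.values.foldl (fun mx e => if mx < e.2 then e.2 else mx) 0) from
      PySem.List.foldl_prod_mk (fun d e => d.modify e.2 [] (fun b => b ++ [e.1]))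
        (fun mx e => if mx < e.2 then e.2 else mx) E.values PySem.Dict.empty 0]
    set L := E.values with hLdef
    set bk := L.foldl (fun d e => d.modify e.2 [] (fun b => b ++ [e.1]))
      (PySem.Dict.empty : PySem.Dict Int (List String)) with hbkdef
    set mxc := L.foldl (fun mx e => if mx < e.2 then e.2 else mx) (0 : Int) with hmxdef
    -- characterize the buckets
    have hbk : ∀ c : Int, bk.getD c [] = (L.filter (fun p => p.2 == c)).map (fun p => p.1) := by
      intro c
      rw [hbkdef]
      rw [show (L.foldl (fun d e => d.modify e.2 [] (fun b => b ++ [e.1]))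
          (PySem.Dict.empty : PySem.Dict Int (List String)))
          = ((L.map (fun e => (e.2, e.1))).foldl (fun d p => d.modify p.1 [] (fun b => b ++ [p.2]))
            (PySem.Dict.empty : PySem.Dict Int (List String))) by rw [List.foldl_map]]
      rw [PySem.Dict.getD_foldl_modify_append]
      rw [PySem.Dict.getD_empty, List.filter_map, List.map_map]
      rfl
    -- bounds on the counts
    obtain ⟨hmx0, hmxub⟩ := pv_foldl_max_bounds L 0
    rw [← hmxdef] at hmx0 hmxub
    have hLC : L = C.items.map (fun p => ((O.get? p.1).getD "", p.2)) := by
      rw [hLdef]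
      simp only [PySem.Dict.values, h1, List.map_map]
      rfl
    have hLpos : ∀ p ∈ L, 1 ≤ p.2 := by
      intro p hp
      rw [hLC] at hp
      obtain ⟨q, hq, hqe⟩ := List.mem_map.mp hp
      rw [← hqe]
      exact hCpos q hq
    have hmxnn : (0 : Int) ≤ mxc := hmx0
    have hcast : ((mxc.toNat : Nat) : Int) = mxc := Int.toNat_of_nonneg hmxnn
    -- B's result via the counting-sort characterization
    rw [pv_outer_spec bk L mc m hbk mxc.toNat mxc rfl []]
    rw [← pv_gather_sorted L mxc.toNat
      (fun p hp => ⟨hLpos p hp, by rw [hcast]; exact hmxub p hp⟩)]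
    -- relate B's sorted value list to A's sorted counter items
    rw [hLC]
    rw [pv_sorted_rev_map C.items (fun p => ((O.get? p.1).getD "", p.2))
      (fun p => p.2) (fun e => e.2) (fun a => rfl)]
    set S := PySem.List.sorted C.items (fun p => p.2) true with hSdef
    have hSp : S.Pairwise (fun a b => b.2 ≤ a.2) := PySem.List.sorted_pairwise_rev _ _
    rw [List.takeWhile_map, ← List.map_take, List.map_map]
    rw [show ((fun p : String × Int => decide (mc ≤ p.2)) ∘
          (fun p : String × Int => ((O.get? p.1).getD "", p.2)))
        = (fun p : String × Int => decide (mc ≤ p.2)) from rfl]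
    simp only [List.nil_append, List.length_nil, Nat.sub_zero]
    -- A's side
    by_cases hm : m ≤ 0
    · rw [show pyMostCommon C (m * 2) = [] by unfold pyMostCommon; rw [if_pos (by omega)]]
      rw [show m.toNat = 0 by omega]
      simp [PySem.List.slice, PySem.List.clampIdx]
    · replace hm : 0 < m := by omega
      rw [show pyMostCommon C (m * 2)
          = PySem.List.slice S none (some (m * 2)) by unfold pyMostCommon; rw [if_neg (by omega)]]
      rw [PySem.List.slice_to S (b := m * 2) (by omega)]
      rw [pv_filter_eq_takeWhile _ mc (hSp.sublist (List.take_sublist _ _))]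
      rw [pv_takeWhile_take]
      rw [PySem.List.slice_to _ (b := m) (by omega)]
      rw [← List.map_take, List.take_take]
      rw [show min m.toNat (m * 2).toNat = m.toNat by omega]
      rw [List.map_map]
      -- both sides are maps over the same list; compare pointwise using membership
      apply List.map_congr_left
      intro p hp
      have hpS : p ∈ S := by
        have h1' : p ∈ S.takeWhile (fun p => decide (mc ≤ p.2)) := List.mem_of_mem_take hp
        exact (List.takeWhile_sublist _).mem h1'
      have hpC : p ∈ C.items := (PySem.List.mem_sorted _ _ _ _).mp hpS
      have hcont : O.contains p.1 = true := by
        rw [h2]; exact pv_mem_contains C p hpC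
      have hsome : (O.get? p.1).isSome := by
        rw [← PySem.Dict.contains_eq_isSome_get?]; exact hcont
      obtain ⟨v, hv⟩ := Option.isSome_iff_exists.mp hsome
      simp [PySem.Dict.getD_eq_get?_getD, hv]

-- ===== VERDICT (by name: the statement is the Claim_ definition above) =====
theorem rank_by_frequency_py_spec : Claim_equal_rank_by_frequency_py := by
  intro items m mc _
  unfold Spec_rank_by_frequency_py
  exact pv_main items m mc
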